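-- pv_equiv track=rewrite | github.com/fergusq/fst-python | pypykko/pypykko/scriptutils.py | determine_wordform_harmony
-- ===== SOURCE A (Python) =====
-- def determine_wordform_harmony(wordform, default=None):
-- 	if default:
-- 		return default.upper()
-- 	for c in reversed(wordform.lower()):
-- 		if c in set('y'):
-- 			return 'FRONT'
-- 		if c in set('aouáóúàòùâôû'):
-- 			return 'BACK'
-- 		if c in set('äöüø'):
-- 			return 'FRONT'
-- 		if c in set('14579'):
-- 			return 'FRONT'
-- 		if c in set('2368'):
-- 			return 'BACK'
-- 	return 'FRONT'
-- ===== SOURCE B (Python) =====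
-- # B: instead of a reversed scan with early returns, compute the last index of a BACK
-- # character and the last index of a FRONT character in the lowered word, then compare.
-- _BACK = 'aouáóúàòùâôû2368'
-- _FRONT = 'yäöüø14579'
--
-- def determine_wordform_harmony(wordform, default=None):
--     if default:
--         return default.upper()
--     s = wordform.lower()
--     last_back = max((i for i, c in enumerate(s) if c in _BACK), default=-1)
--     last_front = max((i for i, c in enumerate(s) if c in _FRONT), default=-1)
--     return 'BACK' if last_back > last_front else 'FRONT'
-- ===== Notes on version B (the rewrite author's own statement) =====
-- stated objective: alternative
-- what changed: Replaces the reversed scan with early return by two staged passes that compute the last index of a BACK character and of a FRONT character in the lowered word and compare the two indices.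
import Mathlib
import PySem

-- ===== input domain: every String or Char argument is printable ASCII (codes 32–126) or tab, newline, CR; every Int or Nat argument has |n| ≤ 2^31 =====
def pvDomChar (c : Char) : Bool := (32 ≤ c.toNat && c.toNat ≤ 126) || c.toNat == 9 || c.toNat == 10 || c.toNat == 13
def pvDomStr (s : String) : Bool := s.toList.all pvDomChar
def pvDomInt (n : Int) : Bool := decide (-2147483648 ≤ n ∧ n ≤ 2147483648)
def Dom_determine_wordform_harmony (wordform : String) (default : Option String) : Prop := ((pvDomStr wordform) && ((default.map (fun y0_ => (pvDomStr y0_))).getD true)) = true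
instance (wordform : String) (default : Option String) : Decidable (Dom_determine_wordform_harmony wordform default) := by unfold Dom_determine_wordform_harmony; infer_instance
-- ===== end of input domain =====

-- B replaces A's reversed scan with early return by two staged passes computing the last index of a BACK char and of a FRONT char, then one comparison; objective: alternative decomposition.

-- ===== PORT A =====
-- A's loop over reversed(wordform.lower()) with early returns, as structural recursion.
def dwh_loopA : List Char → String
  | [] => "FRONT"
  | c :: rest =>
    if c ∈ "y".toList then "FRONT"
    else if c ∈ "aouáóúàòùâôû".toList then "BACK"
    else if c ∈ "äöüø".toList then "FRONT"
    else if c ∈ "14579".toList then "FRONT"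
    else if c ∈ "2368".toList then "BACK"
    else dwh_loopA rest

def determine_wordform_harmony (wordform : String) (default : Option String) : String :=
  match default with
  | some d => if d ≠ "" then PySem.Str.upper d
              else dwh_loopA (PySem.Str.lower wordform).toList.reverse
  | none => dwh_loopA (PySem.Str.lower wordform).toList.reverse

-- ===== PORT B =====
-- max((i for i, c in enumerate(s) if c in chars), default=-1)
def dwh_lastIdx (s : List Char) (chars : List Char) : Int :=
  (((PySem.List.enumerate s 0).filter (fun p => p.2 ∈ chars)).map (fun p => p.1)).foldl max (-1)

def dwh_BACK : List Char := "aouáóúàòùâôû2368".toList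
def dwh_FRONT : List Char := "yäöüø14579".toList

def determine_wordform_harmony_alt (wordform : String) (default : Option String) : String :=
  match default with
  | some d => if d ≠ "" then PySem.Str.upper d
              else
                if dwh_lastIdx (PySem.Str.lower wordform).toList dwh_BACK >
                   dwh_lastIdx (PySem.Str.lower wordform).toList dwh_FRONT
                then "BACK" else "FRONT"
  | none =>
      if dwh_lastIdx (PySem.Str.lower wordform).toList dwh_BACK >
         dwh_lastIdx (PySem.Str.lower wordform).toList dwh_FRONT
      then "BACK" else "FRONT"

-- ===== PRECONDITION & SPEC =====
def Spec_determine_wordform_harmony (wordform : String) (default : Option String) (out : String) : Prop := out = determine_wordform_harmony_alt wordform default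
instance (wordform : String) (default : Option String) (out : String) : Decidable (Spec_determine_wordform_harmony wordform default out) := by unfold Spec_determine_wordform_harmony; infer_instance

-- ===== CLAIM =====
def Claim_equal_determine_wordform_harmony : Prop := ∀ (wordform : String) (default : Option String), Dom_determine_wordform_harmony wordform default → Spec_determine_wordform_harmony wordform default (determine_wordform_harmony wordform default)

-- ===== LEMMAS AND PROOFS =====
-- classification of a single char by A's cascade
def dwh_cat (c : Char) : Option String :=
  if c ∈ "y".toList then some "FRONT"
  else if c ∈ "aouáóúàòùâôû".toList then some "BACK"
  else if c ∈ "äöüø".toList then some "FRONT"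
  else if c ∈ "14579".toList then some "FRONT"
  else if c ∈ "2368".toList then some "BACK"
  else none

theorem dwh_loopA_cons (c : Char) (rest : List Char) :
    dwh_loopA (c :: rest) = (dwh_cat c).getD (dwh_loopA rest) := by
  simp only [dwh_loopA, dwh_cat]
  split_ifs <;> rfl

theorem dwh_cat_cases (c : Char) :
    dwh_cat c = none ∨ dwh_cat c = some "BACK" ∨ dwh_cat c = some "FRONT" := by
  simp only [dwh_cat]; split_ifs <;> simp

theorem dwh_mem_BACK_iff (c : Char) : c ∈ dwh_BACK ↔ dwh_cat c = some "BACK" := by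
  simp only [dwh_BACK, dwh_cat]
  constructor
  · intro h; simp at h
    rcases h with h|h|h|h|h|h|h|h|h|h|h|h|h|h|h|h <;> subst h <;> decide
  · intro h
    by_contra hm
    simp at hm
    revert h
    split_ifs with h1 h2 h3 h4 h5 <;> simp
    · simp at h2; rcases h2 with h|h|h|h|h|h|h|h|h|h|h|h <;> subst h <;> simp_all
    · simp at h5; rcases h5 with h|h|h|h <;> subst h <;> simp_all

theorem dwh_mem_FRONT_iff (c : Char) : c ∈ dwh_FRONT ↔ dwh_cat c = some "FRONT" := by
  simp only [dwh_FRONT, dwh_cat]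
  constructor
  · intro h; simp at h
    rcases h with h|h|h|h|h|h|h|h|h|h <;> subst h <;> decide
  · intro h
    by_contra hm
    simp at hm
    revert h
    split_ifs with h1 h2 h3 h4 h5 <;> simp
    · simp at h1; simp_all
    · simp at h3; rcases h3 with h|h|h|h <;> subst h <;> simp_all
    · simp at h4; rcases h4 with h|h|h|h|h <;> subst h <;> simp_all

theorem dwh_lastIdx_append (l : List Char) (c : Char) (chars : List Char) :
    dwh_lastIdx (l ++ [c]) chars =
      if c ∈ chars then max (dwh_lastIdx l chars) (l.length : Int)
      else dwh_lastIdx l chars := by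
  simp only [dwh_lastIdx, PySem.List.enumerate_append, List.filter_append, List.map_append,
    List.foldl_append]
  by_cases h : c ∈ chars <;>
    simp [h, PySem.List.enumerate]

theorem dwh_lastIdx_lt (l : List Char) (chars : List Char) :
    dwh_lastIdx l chars < (l.length : Int) := by
  induction l using List.reverseRecOn with
  | nil => simp [dwh_lastIdx, PySem.List.enumerate]
  | append_singleton l c ih =>
    rw [dwh_lastIdx_append]
    simp only [List.length_append, List.length_cons, List.length_nil]
    split_ifs <;> push_cast <;> omega

theorem dwh_main (l : List Char) :
    dwh_loopA l.reverse =
      if dwh_lastIdx l dwh_BACK > dwh_lastIdx l dwh_FRONT then "BACK" else "FRONT" := by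
  induction l using List.reverseRecOn with
  | nil => simp [dwh_loopA, dwh_lastIdx, PySem.List.enumerate]
  | append_singleton l c ih =>
    rw [List.reverse_append, List.reverse_singleton, List.singleton_append, dwh_loopA_cons,
      dwh_lastIdx_append, dwh_lastIdx_append]
    have hB := dwh_mem_BACK_iff c
    have hF := dwh_mem_FRONT_iff c
    have hLB := dwh_lastIdx_lt l dwh_BACK
    have hLF := dwh_lastIdx_lt l dwh_FRONT
    rcases dwh_cat_cases c with h | h | h <;> rw [h]
    · have hb : c ∉ dwh_BACK := by simp [hB, h]
      have hf : c ∉ dwh_FRONT := by simp [hF, h]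
      simp only [if_neg hb, if_neg hf, Option.getD_none]
      exact ih
    · have hb : c ∈ dwh_BACK := hB.mpr h
      have hf : c ∉ dwh_FRONT := by simp [hF, h]
      rw [if_pos hb, if_neg hf, Option.getD_some, if_pos]
      have := le_max_right (dwh_lastIdx l dwh_BACK) ((l.length : Int))
      omega
    · have hb : c ∉ dwh_BACK := by simp [hB, h]
      have hf : c ∈ dwh_FRONT := hF.mpr h
      rw [if_neg hb, if_pos hf, Option.getD_some, if_neg]
      have := le_max_right (dwh_lastIdx l dwh_FRONT) ((l.length : Int))
      omega

-- ===== VERDICT =====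
theorem determine_wordform_harmony_spec : Claim_equal_determine_wordform_harmony := by
  intro wordform default _
  unfold Spec_determine_wordform_harmony determine_wordform_harmony determine_wordform_harmony_alt
  cases default with
  | none => exact dwh_main _
  | some d =>
    by_cases h : d = "" <;> simp [h, dwh_main]
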